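-- pv_equiv track=rewrite | github.com/gimlelabs/gimle-hugin | src/gimle/hugin/artifacts/query_engine.py | _create_preview
-- ===== SOURCE A (Python) =====
-- from typing import TYPE_CHECKING, Any, Dict, List, Optional, Tuple
--
-- def _create_preview(
--     content: str, query_terms: List[str], max_length: int = 200
-- ) -> str:
--     """
--     Create a preview with context around query terms.
--
--     Tries to show the part of content that contains query terms.
--
--     Args:
--         content: The content to create a preview for.
--         query_terms: The terms to search for.
--         max_length: The maximum length of the preview.
--
--     Returns:
--         The preview of the content.
--     """
--     if not query_terms:
--         return content[:max_length] + (
--             "..." if len(content) > max_length else ""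
--         )
--
--     # Find first occurrence of any query term
--     content_lower = content.lower()
--     first_match_pos = len(content)
--
--     for term in query_terms:
--         pos = content_lower.find(term)
--         if pos != -1 and pos < first_match_pos:
--             first_match_pos = pos
--
--     if first_match_pos < len(content):
--         # Start preview a bit before the match
--         start = max(0, first_match_pos - 50)
--         end = min(len(content), start + max_length)
--
--         preview = content[start:end]
--
--         # Add ellipsis if truncated
--         if start > 0:
--             preview = "..." + preview
--         if end < len(content):
--             preview = preview + "..."
--
--         return preview
--     else:
--         # No match found, return beginning
--         return content[:max_length] + (
--             "..." if len(content) > max_length else ""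
--         )
-- ===== SOURCE B (Python) =====
-- def _create_preview(content, query_terms, max_length=200):
--     """Position-major scan: walk content once and stop at the first index where
--     any query term starts, instead of running a full find() per term and
--     taking the minimum."""
--     n = len(content)
--     if not query_terms:
--         return content[:max_length] + ("..." if n > max_length else "")
--
--     content_lower = content.lower()
--     first_match_pos = n
--     for i in range(n):
--         if any(content_lower.startswith(term, i) for term in query_terms):
--             first_match_pos = i
--             break
--
--     if first_match_pos < n:
--         start = max(0, first_match_pos - 50)
--         end = min(n, start + max_length)
--         preview = content[start:end]
--         if start > 0:
--             preview = "..." + preview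
--         if end < n:
--             preview = preview + "..."
--         return preview
--     else:
--         return content[:max_length] + ("..." if n > max_length else "")
-- ===== Notes on version B (the rewrite author's own statement) =====
-- stated objective: alternative
-- what changed: B replaces A's term-major loop (a full find() per term plus a running minimum) by a single position-major left-to-right scan of the content that stops (early exit) at the first index where any query term starts.
import Mathlib
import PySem

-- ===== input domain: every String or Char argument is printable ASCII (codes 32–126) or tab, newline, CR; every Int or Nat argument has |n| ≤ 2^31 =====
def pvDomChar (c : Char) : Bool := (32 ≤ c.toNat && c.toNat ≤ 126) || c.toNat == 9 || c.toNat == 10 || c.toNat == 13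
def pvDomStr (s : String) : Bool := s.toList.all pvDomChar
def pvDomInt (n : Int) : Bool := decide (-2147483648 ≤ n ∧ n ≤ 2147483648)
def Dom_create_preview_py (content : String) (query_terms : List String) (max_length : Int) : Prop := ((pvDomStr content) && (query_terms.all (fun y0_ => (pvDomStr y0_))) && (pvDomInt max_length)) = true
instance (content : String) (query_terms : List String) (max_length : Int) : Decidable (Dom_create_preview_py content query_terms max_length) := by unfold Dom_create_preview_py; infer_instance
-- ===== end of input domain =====

-- B replaces A's per-term full `find` + running minimum by a single position-major
-- scan of the content that stops at the first index where any term starts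
-- (objective: alternative traversal, same observable result).

-- ===== PORT A =====
def create_preview_py (content : String) (query_terms : List String) (max_length : Int) : String :=
  if query_terms = [] then
    PySem.Str.slice content none (some max_length) ++
      (if (PySem.Str.len content : Int) > max_length then "..." else "")
  else
    let content_lower := PySem.Str.lower content
    let first_match_pos : Int := query_terms.foldl
      (fun acc term =>
        let pos := PySem.Str.find content_lower term
        if pos ≠ -1 ∧ pos < acc then pos else acc)
      ((PySem.Str.len content : Int))
    if first_match_pos < (PySem.Str.len content : Int) then
      let start := max 0 (first_match_pos - 50)
      let «end» := min (PySem.Str.len content : Int) (start + max_length)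
      let preview := PySem.Str.slice content (some start) (some «end»)
      let preview := if start > 0 then "..." ++ preview else preview
      let preview := if «end» < (PySem.Str.len content : Int) then preview ++ "..." else preview
      preview
    else
      PySem.Str.slice content none (some max_length) ++
        (if (PySem.Str.len content : Int) > max_length then "..." else "")

-- ===== PORT B =====
-- any(content_lower.startswith(term, i) for term in query_terms), on the suffix cl[i:]
-- (exact: for 0 ≤ i, s.startswith(t, i) is s[i:].startswith(t))
def pvStartsAnyAt (query_terms : List String) (l : List Char) : Bool :=
  query_terms.any (fun term => PySem.Chars.startswith l term.toList)

-- B's 'for i in range(n): if any(...): first = i; break' loop: structural recursion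
-- over the remaining suffix of content_lower, carrying the current index i
def pvScan (query_terms : List String) : List Char → Nat → Option Nat
  | [], _ => none
  | cs@(_ :: rest), i =>
      if pvStartsAnyAt query_terms cs then some i else pvScan query_terms rest (i + 1)

def create_preview_py_alt (content : String) (query_terms : List String) (max_length : Int) : String :=
  let n : Int := (PySem.Str.len content : Int)
  if query_terms = [] then
    PySem.Str.slice content none (some max_length) ++ (if n > max_length then "..." else "")
  else
    let cl := (PySem.Str.lower content).toList
    let first_match_pos : Int :=
      match pvScan query_terms cl 0 with
      | some i => (i : Int)
      | none => n
    if first_match_pos < n then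
      let start := max 0 (first_match_pos - 50)
      let «end» := min n (start + max_length)
      let preview := PySem.Str.slice content (some start) (some «end»)
      let preview := if start > 0 then "..." ++ preview else preview
      let preview := if «end» < n then preview ++ "..." else preview
      preview
    else
      PySem.Str.slice content none (some max_length) ++ (if n > max_length then "..." else "")

-- ===== PRECONDITION & SPEC =====
def Spec_create_preview_py (content : String) (query_terms : List String) (max_length : Int) (out : String) : Prop := out = create_preview_py_alt content query_terms max_length
instance (content : String) (query_terms : List String) (max_length : Int) (out : String) : Decidable (Spec_create_preview_py content query_terms max_length out) := by unfold Spec_create_preview_py; infer_instance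

-- ===== CLAIM (what is proved, stated in full; the proofs are below) =====
def Claim_equal_create_preview_py : Prop := ∀ (content : String) (query_terms : List String) (max_length : Int), Dom_create_preview_py content query_terms max_length → Spec_create_preview_py content query_terms max_length (create_preview_py content query_terms max_length)

-- ===== LEMMAS AND PROOFS =====

-- A's running-minimum loop body, over a fixed lowered content cl
def pvStep (cl : List Char) (acc : Int) (term : String) : Int :=
  if PySem.Chars.find cl term.toList ≠ -1 ∧ PySem.Chars.find cl term.toList < acc
  then PySem.Chars.find cl term.toList else acc

-- shape of A's fold result: bounded by the accumulator, and either the accumulator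
-- itself or a non-negative find-position of one of the terms
lemma pvFold_shape (cl : List Char) (ts : List String) :
    ∀ acc : Int, ts.foldl (pvStep cl) acc ≤ acc ∧
      (ts.foldl (pvStep cl) acc = acc ∨
        ∃ t ∈ ts, ts.foldl (pvStep cl) acc = PySem.Chars.find cl t.toList ∧
          0 ≤ ts.foldl (pvStep cl) acc) := by
  induction ts with
  | nil => intro acc; simp
  | cons t ts ih =>
      intro acc
      have h1 := ih (pvStep cl acc t)
      have hfind := PySem.Chars.neg_one_le_find cl t.toList
      have hstep : pvStep cl acc t ≤ acc ∧
          (pvStep cl acc t = acc ∨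
            (pvStep cl acc t = PySem.Chars.find cl t.toList ∧ 0 ≤ pvStep cl acc t)) := by
        unfold pvStep
        split_ifs with h
        · exact ⟨le_of_lt h.2, Or.inr ⟨rfl, by omega⟩⟩
        · exact ⟨le_refl _, Or.inl rfl⟩
      rw [List.foldl_cons]
      refine ⟨le_trans h1.1 hstep.1, ?_⟩
      rcases h1.2 with h | ⟨t', ht', heq, hnn⟩
      · rcases hstep.2 with h2 | ⟨h2, hnn⟩
        · exact Or.inl (h.trans h2)
        · exact Or.inr ⟨t, List.mem_cons_self .., h.trans h2, by rw [h]; exact hnn⟩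
      · exact Or.inr ⟨t', List.mem_cons_of_mem _ ht', heq, hnn⟩

-- minimality of A's fold: it is ≤ every successful find among the terms
lemma pvFold_min (cl : List Char) (ts : List String) :
    ∀ acc : Int, ∀ t ∈ ts, PySem.Chars.find cl t.toList ≠ -1 →
      ts.foldl (pvStep cl) acc ≤ PySem.Chars.find cl t.toList := by
  induction ts with
  | nil => intro _ t ht; simp at ht
  | cons u ts ih =>
      intro acc t ht hfind
      rw [List.foldl_cons]
      rcases List.mem_cons.mp ht with rfl | ht'
      · have h1 := (pvFold_shape cl ts (pvStep cl acc t)).1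
        have h2 : pvStep cl acc t ≤ PySem.Chars.find cl t.toList := by
          unfold pvStep
          split_ifs with h
          · exact le_refl _
          · push Not at h; exact h hfind
        exact le_trans h1 h2
      · exact ih _ t ht' hfind

-- pvScan returning some k: k is a valid in-range index with a match at offset k - i
lemma pvScan_some (ts : List String) :
    ∀ (l : List Char) (i k : Nat), pvScan ts l i = some k →
      i ≤ k ∧ k - i < l.length ∧ pvStartsAnyAt ts (l.drop (k - i)) = true := by
  intro l
  induction l with
  | nil => intro i k h; simp [pvScan] at h
  | cons c rest ih =>
      intro i k h
      rw [pvScan] at h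
      split_ifs at h with hc
      · obtain rfl : i = k := by simpa using h
        simpa using hc
      · obtain ⟨h1, h2, h3⟩ := ih (i + 1) k h
        refine ⟨by omega, by simp; omega, ?_⟩
        have : (c :: rest).drop (k - i) = rest.drop (k - (i + 1)) := by
          have : k - i = (k - (i + 1)) + 1 := by omega
          simp [this]
        rwa [this]

-- pvScan returning none: no position of l matches
lemma pvScan_none (ts : List String) :
    ∀ (l : List Char) (i : Nat), pvScan ts l i = none →
      ∀ m < l.length, pvStartsAnyAt ts (l.drop m) = false := by
  intro l
  induction l with
  | nil => intro i _ m hm; simp at hm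
  | cons c rest ih =>
      intro i h m hm
      rw [pvScan] at h
      split_ifs at h with hc
      match m with
      | 0 => simpa using hc
      | m + 1 => exact ih (i + 1) h m (by simpa using hm)

-- minimality of pvScan: if position m matches it returns some k with k ≤ i + m
lemma pvScan_min (ts : List String) :
    ∀ (l : List Char) (m i : Nat), m < l.length → pvStartsAnyAt ts (l.drop m) = true →
      ∃ k, pvScan ts l i = some k ∧ k ≤ i + m := by
  intro l
  induction l with
  | nil => intro m i hm; simp at hm
  | cons c rest ih =>
      intro m i hm hmatch
      rw [pvScan]
      split_ifs with hc
      · exact ⟨i, rfl, by omega⟩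
      · match m with
        | 0 => simp at hmatch; exact absurd hmatch (by simpa using hc)
        | m + 1 =>
            obtain ⟨k, hk, hle⟩ := ih m (i + 1) (by simpa using hm) (by simpa using hmatch)
            exact ⟨k, hk, by omega⟩

-- a match at offset m means some term is a prefix of the suffix at m
lemma pvStartsAnyAt_iff (ts : List String) (l : List Char) :
    pvStartsAnyAt ts l = true ↔ ∃ t ∈ ts, t.toList <+: l := by
  simp [pvStartsAnyAt, PySem.Chars.startswith_iff]

-- the heart of the equivalence: A's fold over terms of minimal find positions equals
-- B's left-to-right scan for the first position where any term starts
lemma pvFirst_eq (ts : List String) (cl : List Char) :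
    ts.foldl (pvStep cl) (cl.length : Int) =
      (match pvScan ts cl 0 with
       | some i => (i : Int)
       | none => (cl.length : Int)) := by
  cases hscan : pvScan ts cl 0 with
  | none =>
      simp only
      rcases (pvFold_shape cl ts (cl.length : Int)).2 with h | ⟨t, ht, heq, hnn⟩
      · exact h
      · -- the fold found a real position: find cl t ≥ 0
        set p := PySem.Chars.find cl t.toList with hp
        have hple : p ≤ (cl.length : Int) := PySem.Chars.find_le_length cl t.toList
        have hnn' : 0 ≤ p := heq ▸ hnn
        have hspec := PySem.Chars.find_spec (s := cl) (sub := t.toList) hnn'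
        by_cases hlt : p.toNat < cl.length
        · -- contradiction with pvScan = none
          have hmatch : pvStartsAnyAt ts (cl.drop p.toNat) = true :=
            (pvStartsAnyAt_iff ts _).mpr ⟨t, ht, hspec.1⟩
          have := pvScan_none ts cl 0 hscan p.toNat hlt
          rw [hmatch] at this; cases this
        · rw [heq]; omega
  | some k =>
      simp only
      obtain ⟨-, hk, hmatch⟩ := pvScan_some ts cl 0 k hscan
      simp only [Nat.sub_zero] at hk hmatch
      obtain ⟨t, ht, hpre⟩ := (pvStartsAnyAt_iff ts _).mp hmatch
      -- find cl t succeeds and is ≤ k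
      have hinf : t.toList <:+: cl := hpre.isInfix.trans (cl.drop_suffix k).isInfix
      have hne : PySem.Chars.find cl t.toList ≠ -1 :=
        (PySem.Chars.find_ne_neg_one_iff cl t.toList).mpr hinf
      have hnn : 0 ≤ PySem.Chars.find cl t.toList := by
        have := PySem.Chars.neg_one_le_find cl t.toList; omega
      have hspec := PySem.Chars.find_spec (s := cl) (sub := t.toList) hnn
      have hfindk : PySem.Chars.find cl t.toList ≤ (k : Int) := by
        by_contra hgt
        exact hspec.2 k (by omega) hpre
      have hub : ts.foldl (pvStep cl) (cl.length : Int) ≤ (k : Int) :=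
        le_trans (pvFold_min cl ts _ t ht hne) hfindk
      -- lower bound: the fold result is itself a matching position, so pvScan minimality gives k ≤ fold
      rcases (pvFold_shape cl ts (cl.length : Int)).2 with h | ⟨t', ht', heq, hnn'⟩
      · omega
      · set q := ts.foldl (pvStep cl) (cl.length : Int) with hq
        have hspec' := PySem.Chars.find_spec (s := cl) (sub := t'.toList) (heq ▸ hnn')
        have hqlt : q.toNat < cl.length := by omega
        have hmatch' : pvStartsAnyAt ts (cl.drop q.toNat) = true := by
          refine (pvStartsAnyAt_iff ts _).mpr ⟨t', ht', ?_⟩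
          have : q.toNat = (PySem.Chars.find cl t'.toList).toNat := by rw [heq]
          rw [this]; exact hspec'.1
        obtain ⟨k', hk', hle'⟩ := pvScan_min ts cl q.toNat 0 hqlt hmatch'
        rw [hscan] at hk'
        obtain rfl : k = k' := by simpa using hk'
        omega

-- ===== VERDICT (by name: the statement is the Claim_ definition above) =====
theorem create_preview_py_spec : Claim_equal_create_preview_py := by
  intro content query_terms max_length _
  unfold Spec_create_preview_py create_preview_py create_preview_py_alt
  by_cases hq : query_terms = []
  · simp [hq]
  · simp only [if_neg hq]
    have hlen : (PySem.Str.len content : Int) =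
        (((PySem.Str.lower content).toList.length : Nat) : Int) := by
      simp [PySem.Chars.lower]
    have hfirst : query_terms.foldl
        (fun acc term =>
          let pos := PySem.Str.find (PySem.Str.lower content) term
          if pos ≠ -1 ∧ pos < acc then pos else acc)
        ((PySem.Str.len content : Int)) =
        (match pvScan query_terms (PySem.Str.lower content).toList 0 with
         | some i => (i : Int)
         | none => (PySem.Str.len content : Int)) := by
      have := pvFirst_eq query_terms (PySem.Str.lower content).toList
      rw [hlen]
      convert this using 2
    rw [hfirst]
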